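-- pv_equiv track=rewrite | github.com/r1cegod/Raven | src/backend/observability/packets.py | format_final_label_counts
-- ===== SOURCE A (Python) =====
-- from typing import Any
--
-- def format_final_label_counts(rows: list[dict[str, Any]]) -> str:
--     if not rows:
--         return "none"
--     counts: dict[str, int] = {}
--     for row in rows:
--         label = str(row.get("sexy_label") or "unlabeled")
--         counts[label] = counts.get(label, 0) + 1
--     return ", ".join(f"`{label}` {count}" for label, count in sorted(counts.items()))
-- ===== SOURCE B (Python) =====
-- def format_final_label_counts(rows: list[dict[str, object]]) -> str:
--     if not rows:
--         return "none"
--     labels = sorted(str(row.get("sexy_label") or "unlabeled") for row in rows)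
--     parts = []
--     i, n = 0, len(labels)
--     while i < n:
--         j = i
--         while j < n and labels[j] == labels[i]:
--             j += 1
--         parts.append(f"`{labels[i]}` {j - i}")
--         i = j
--     return ", ".join(parts)
-- ===== Notes on version B (the rewrite author's own statement) =====
-- stated objective: alternative
-- what changed: B replaces A's dict-based aggregation (count into a hash map, then sort the items) by sort-then-scan: it sorts the full label list and collapses consecutive equal runs into `label` count parts in one pass.
import Mathlib
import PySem

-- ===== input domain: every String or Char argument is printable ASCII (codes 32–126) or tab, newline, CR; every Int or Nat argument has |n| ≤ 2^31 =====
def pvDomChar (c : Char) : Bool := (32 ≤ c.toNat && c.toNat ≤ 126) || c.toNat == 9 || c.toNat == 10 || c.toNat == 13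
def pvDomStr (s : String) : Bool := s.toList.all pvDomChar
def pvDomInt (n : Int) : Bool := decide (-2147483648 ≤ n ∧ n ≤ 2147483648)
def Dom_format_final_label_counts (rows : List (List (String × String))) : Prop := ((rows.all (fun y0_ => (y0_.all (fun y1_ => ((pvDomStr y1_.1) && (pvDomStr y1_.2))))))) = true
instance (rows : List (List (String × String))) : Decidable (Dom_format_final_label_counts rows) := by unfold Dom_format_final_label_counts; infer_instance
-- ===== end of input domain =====

-- B sorts the per-row label list and collapses equal runs in one scan instead of
-- hash-aggregating into a dict and sorting the items (objective: alternative decomposition).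

-- ===== PORT A =====
-- label = str(row.get("sexy_label") or "unlabeled")
def pvLabelA (row : List (String × String)) : String :=
  match (PySem.Dict.mk row).get? "sexy_label" with
  | some v => if v = "" then "unlabeled" else v
  | none => "unlabeled"

-- f"`{label}` {count}"
def pvFmtA (p : String × Int) : String := "`" ++ p.1 ++ "` " ++ PySem.Int.toStr p.2
def format_final_label_counts (rows : List (List (String × String))) : String :=
  match rows with
  | [] => "none"
  | _ =>
    let counts := rows.foldl (fun d row =>
      let label := pvLabelA row
      d.insert label (d.getD label 0 + 1)) PySem.Dict.empty
    PySem.Str.join ", "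
      ((PySem.List.sorted2 counts.items (fun p => p.1) (fun p => p.2)).map pvFmtA)

-- ===== PORT B =====
-- label = str(row.get("sexy_label") or "unlabeled")  (B computes it the same way)
def pvLabelB (row : List (String × String)) : String :=
  match (PySem.Dict.mk row).get? "sexy_label" with
  | some v => if v = "" then "unlabeled" else v
  | none => "unlabeled"

-- f"`{label}` {j - i}"
def pvFmtB (p : String × Int) : String := "`" ++ p.1 ++ "` " ++ PySem.Int.toStr p.2

-- the index scan 'while j < n and labels[j] == labels[i]' collapsing one run after another
def pvRuns : List String → List (String × Int)
  | [] => []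
  | x :: xs =>
    (x, ((xs.takeWhile (· == x)).length : Int) + 1) :: pvRuns (xs.dropWhile (· == x))
termination_by s => s.length
decreasing_by
  simpa [Nat.lt_succ_iff] using List.length_dropWhile_le (· == x) xs

def format_final_label_counts_alt (rows : List (List (String × String))) : String :=
  if rows.isEmpty then "none"
  else
    let labels := PySem.List.sorted (rows.map pvLabelB) (fun x => x) false
    PySem.Str.join ", " ((pvRuns labels).map pvFmtB)

-- ===== PRECONDITION & SPEC =====
def Spec_format_final_label_counts (rows : List (List (String × String))) (out : String) : Prop := out = format_final_label_counts_alt rows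
instance (rows : List (List (String × String))) (out : String) : Decidable (Spec_format_final_label_counts rows out) := by unfold Spec_format_final_label_counts; infer_instance

-- ===== CLAIM (what is proved, stated in full; the proofs are below) =====
def Claim_equal_format_final_label_counts : Prop := ∀ (rows : List (List (String × String))), Dom_format_final_label_counts rows → Spec_format_final_label_counts rows (format_final_label_counts rows)

-- ===== LEMMAS AND PROOFS =====

-- insertBy only compares the inserted element with members of the accumulator
theorem pv_insertBy_congr {α : Type} (f g : α → α → Bool) (x : α) :
    ∀ (acc : List α), (∀ b ∈ acc, f x b = g x b) →
      PySem.List.insertBy f x acc = PySem.List.insertBy g x acc := by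
  intro acc
  induction acc with
  | nil => intro _; rfl
  | cons y ys ih =>
    intro h
    simp only [PySem.List.insertBy, h y (by simp)]
    by_cases hg : g x y = true
    · simp [hg]
    · simp only [Bool.not_eq_true] at hg
      simp [hg, ih (fun b hb => h b (by simp [hb]))]

theorem pv_foldl_insertBy_congr {α : Type} (f g : α → α → Bool) :
    ∀ (xs acc : List α), (∀ a ∈ xs, ∀ b, (b ∈ acc ∨ b ∈ xs) → f a b = g a b) →
      xs.foldl (fun acc x => PySem.List.insertBy f x acc) acc
        = xs.foldl (fun acc x => PySem.List.insertBy g x acc) acc := by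
  intro xs
  induction xs with
  | nil => intro _ _; rfl
  | cons x xs ih =>
    intro acc h
    simp only [List.foldl_cons]
    rw [pv_insertBy_congr f g x acc (fun b hb => h x (by simp) b (Or.inl hb))]
    exact ih _ (fun a ha b hb => by
      rcases hb with hb | hb
      · rcases (PySem.List.mem_insertBy g x b acc).mp hb with rfl | hb
        · exact h a (by simp [ha]) b (Or.inr (by simp))
        · exact h a (by simp [ha]) b (Or.inl hb)
      · exact h a (by simp [ha]) b (Or.inr (by simp [hb])))

-- on a list whose first components are pairwise distinct, sorting by the Python
-- tuple order (fst, snd) is sorting by fst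
theorem pv_sorted2_eq_sorted_fst (xs : List (String × Int))
    (hinj : ∀ a ∈ xs, ∀ b ∈ xs, a.1 = b.1 → a = b) :
    PySem.List.sorted2 xs (fun p => p.1) (fun p => p.2) false
      = PySem.List.sorted xs (fun p => p.1) false := by
  show xs.foldl (fun acc x => PySem.List.insertBy _ x acc) []
      = xs.foldl (fun acc x => PySem.List.insertBy _ x acc) []
  apply pv_foldl_insertBy_congr
  intro a ha b hb
  have hb' : b ∈ xs := by tauto
  by_cases h1 : a.1 < b.1
  · simp [h1]
  · by_cases h2 : b.1 < a.1
    · simp [h2]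
    · have : a.1 = b.1 := le_antisymm (not_lt.mp h2) (not_lt.mp h1)
      have : a = b := hinj a ha b hb' this
      subst this
      simp

-- the runs of a ≤-sorted list: strictly increasing heads, same members, counts
theorem pvRuns_spec : ∀ (s : List String), s.Pairwise (· ≤ ·) →
    (pvRuns s).Pairwise (fun a b => a.1 < b.1) ∧
    (∀ k, (k ∈ (pvRuns s).map (fun p => p.1)) ↔ k ∈ s) ∧
    (∀ p ∈ pvRuns s, p.2 = (s.count p.1 : Int)) := by
  intro s
  induction s using pvRuns.induct with
  | case1 => intro _; simp [pvRuns]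
  | case2 x xs ih =>
    intro hpw
    have hxle : ∀ y ∈ xs, x ≤ y := (List.pairwise_cons.mp hpw).1
    have hxs_pw : xs.Pairwise (· ≤ ·) := (List.pairwise_cons.mp hpw).2
    set g := xs.takeWhile (· == x) with hg
    set rest := xs.dropWhile (· == x) with hrest
    have hsplit : g ++ rest = xs := List.takeWhile_append_dropWhile
    have hgx : ∀ y ∈ g, y = x := by
      intro y hy
      simpa using List.mem_takeWhile_imp hy
    have hrest_pw : rest.Pairwise (· ≤ ·) :=
      List.Pairwise.sublist (List.dropWhile_sublist (· == x)) hxs_pw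
    have hrest_mem_xs : ∀ y ∈ rest, y ∈ xs := by
      intro y hy; exact (List.dropWhile_sublist (· == x)).mem hy
    have hgt : ∀ y ∈ rest, x < y := by
      cases hr : rest with
      | nil => simp
      | cons h t =>
        have hd : xs.dropWhile (· == x) = h :: t := hrest ▸ hr
        have hhx : h ≠ x := by
          have := List.head_dropWhile_not (· == x) (l := xs) (by simp [hd])
          simp only [hd, List.head_cons] at this
          simpa using this
        have hxh : x < h :=
          lt_of_le_of_ne (hxle h (hrest_mem_xs h (by simp [hr]))) (Ne.symm hhx)
        intro y hy
        rcases List.mem_cons.mp hy with rfl | hy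
        · exact hxh
        · exact lt_of_lt_of_le hxh ((List.pairwise_cons.mp (hr ▸ hrest_pw)).1 y hy)
    obtain ⟨ih1, ih2, ih3⟩ := ih hrest_pw
    have hmem_fst : ∀ p ∈ pvRuns rest, p.1 ∈ rest := by
      intro p hp
      exact (ih2 p.1).mp (List.mem_map.mpr ⟨p, hp, rfl⟩)
    have hcount_g : ∀ k, k ≠ x → g.count k = 0 := by
      intro k hk
      rw [List.count_eq_zero]
      intro hkg
      exact hk (hgx k hkg)
    have hcount_rest_x : rest.count x = 0 := by
      rw [List.count_eq_zero]
      intro hx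
      exact lt_irrefl x (hgt x hx)
    have hunf : pvRuns (x :: xs) = (x, (g.length : Int) + 1) :: pvRuns rest := by
      rw [pvRuns, ← hrest, ← hg]
    refine ⟨?_, ?_, ?_⟩
    · rw [hunf]
      refine List.pairwise_cons.mpr ⟨?_, ih1⟩
      intro p hp
      exact hgt p.1 (hmem_fst p hp)
    · intro k
      rw [hunf]
      simp only [List.map_cons, List.mem_cons, ih2]
      constructor
      · rintro (rfl | hk)
        · simp
        · exact Or.inr (hrest_mem_xs k hk)
      · rintro (rfl | hk)
        · exact Or.inl rfl
        · rw [← hsplit, List.mem_append] at hk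
          rcases hk with hk | hk
          · exact Or.inl (hgx k hk)
          · exact Or.inr hk
    · intro p hp
      rw [hunf] at hp
      rcases List.mem_cons.mp hp with rfl | hp
      · have hcg : g.count x = g.length := List.count_eq_length.mpr (fun b hb => (hgx b hb).symm)
        simp only [List.count_cons_self, ← hsplit, List.count_append, hcg, hcount_rest_x]
        push_cast
        ring
      · have hpx : p.1 ≠ x := fun h => lt_irrefl x (h ▸ hgt p.1 (hmem_fst p hp))
        rw [ih3 p hp, ← hsplit]
        simp [List.count_append, hcount_g p.1 hpx, Ne.symm hpx]

-- both sides name the same canonical list: the sorted distinct labels with their counts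
theorem pv_sides_eq (L : List String) :
    PySem.List.sorted2 (PySem.Dict.counter L).items (fun p => p.1) (fun p => p.2) false
      = pvRuns (PySem.List.sorted L (fun x => x) false) := by
  set K := PySem.List.sorted (PySem.Set.ofList L) (fun x => x) false with hK
  set T := K.map (fun k => (k, (L.count k : Int))) with hT
  -- A side
  have hitems : (PySem.Dict.counter L).items
      = (PySem.Set.ofList L).map (fun k => (k, (L.count k : Int))) := PySem.Dict.items_counter L
  have hinj : ∀ a ∈ (PySem.Dict.counter L).items, ∀ b ∈ (PySem.Dict.counter L).items,
      a.1 = b.1 → a = b := by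
    rw [hitems]
    rintro a ha b hb hab
    obtain ⟨ka, -, rfl⟩ := List.mem_map.mp ha
    obtain ⟨kb, -, rfl⟩ := List.mem_map.mp hb
    simp_all
  have hA : PySem.List.sorted2 (PySem.Dict.counter L).items (fun p => p.1) (fun p => p.2) false = T := by
    rw [pv_sorted2_eq_sorted_fst _ hinj]
    apply PySem.List.sorted_eq_of_perm_of_pairwise_lt
    · rw [hitems, hT]
      exact (PySem.List.sorted_perm (PySem.Set.ofList L) (fun x => x) false).map _
    · rw [hT]
      exact List.Pairwise.map _ (fun a b h => h) (PySem.List.sorted_ofList_pairwise_lt L)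
  -- B side
  set s := PySem.List.sorted L (fun x => x) false with hs
  obtain ⟨h1, h2, h3⟩ := pvRuns_spec s (PySem.List.sorted_pairwise L (fun x => x))
  have hsperm : s.Perm L := PySem.List.sorted_perm L (fun x => x) false
  have hfst_pw : ((pvRuns s).map (fun p => p.1)).Pairwise (· < ·) :=
    List.pairwise_map.mpr h1
  have hKfst : K = (pvRuns s).map (fun p => p.1) := by
    apply PySem.List.sorted_eq_of_perm_of_pairwise_lt _ _ (fun x => x) _ hfst_pw
    rw [List.perm_ext_iff_of_nodup (hfst_pw.imp ne_of_lt) (PySem.Set.nodup_ofList L)]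
    intro a
    rw [h2 a, PySem.Set.mem_ofList, ← hsperm.mem_iff]
  have hB : T = pvRuns s := by
    rw [hT, hKfst, List.map_map]
    nth_rewrite 2 [show pvRuns s = (pvRuns s).map id from (List.map_id _).symm]
    apply List.map_congr_left
    intro p hp
    have := h3 p hp
    rw [hsperm.count_eq] at this
    simp [Function.comp, ← this]
  rw [hA, hB]

-- ===== VERDICT (by name: the statement is the Claim_ definition above) =====
theorem format_final_label_counts_spec : Claim_equal_format_final_label_counts := by
  intro rows _
  unfold Spec_format_final_label_counts format_final_label_counts format_final_label_counts_alt
  cases rows with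
  | nil => rfl
  | cons r rs =>
    simp only [List.isEmpty_cons, Bool.false_eq_true, if_false]
    rw [show ((r :: rs).foldl (fun d row =>
          let label := pvLabelA row
          d.insert label (d.getD label 0 + 1)) PySem.Dict.empty)
        = PySem.Dict.counter ((r :: rs).map pvLabelA) from by
      rw [← PySem.Dict.foldl_insert_getD_add_one_eq_counter, List.foldl_map]]
    rw [show pvLabelB = pvLabelA from rfl, show pvFmtB = pvFmtA from rfl, pv_sides_eq]
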